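-- pv_equiv track=rewrite | github.com/khan0604/Face-Recognition | Face-Recognition/Face Recognition Code/testing.py | find_votes
-- ===== SOURCE A (Python) =====
-- def find_votes(final_list):
--     dic = {}
--     for item in final_list:
--         if item[1] in dic:
--             dic[item[1]] += 1
--         else:
--             dic[item[1]] = 1
--
--     max_vote = 0
--     result = " "
--     for key in dic:
--         if dic[key] > max_vote:
--             max_vote = dic[key]
--             result = key
--
--     return result
-- ===== SOURCE B (Python) =====
-- def find_votes(final_list):
--     dic = {}
--     for item in final_list:
--         dic[item[1]] = dic.get(item[1], 0) + 1
--     if not dic: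
--         return " "
--     return sorted(dic, key=lambda k: -dic[k])[0]
-- ===== Notes on version B (the rewrite author's own statement) =====
-- stated objective: alternative
-- what changed: Replaces A's strict-greater max scan over the dict by a stable sort of the keys on descending count and taking the first element (stability preserves insertion order among ties, matching A's first-maximum pick); the count dict is built with dict.get instead of an if/else membership test.
import Mathlib
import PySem

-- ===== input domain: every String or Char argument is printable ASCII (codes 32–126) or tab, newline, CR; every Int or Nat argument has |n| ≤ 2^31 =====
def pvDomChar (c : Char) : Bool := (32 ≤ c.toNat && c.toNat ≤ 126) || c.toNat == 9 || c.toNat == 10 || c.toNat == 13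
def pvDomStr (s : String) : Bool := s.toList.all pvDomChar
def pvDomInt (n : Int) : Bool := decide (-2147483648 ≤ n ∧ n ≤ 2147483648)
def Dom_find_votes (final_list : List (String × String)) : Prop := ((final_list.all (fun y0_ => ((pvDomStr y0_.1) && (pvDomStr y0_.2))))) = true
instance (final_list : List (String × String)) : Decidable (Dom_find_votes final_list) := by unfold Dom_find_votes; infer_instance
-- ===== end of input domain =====

-- B replaces A's strict-greater max scan over the count dict by a stable sort of the
-- keys on descending count and taking the first element (alternative strategy, same result).


-- ===== PORT A =====
def find_votes (final_list : List (String × String)) : String :=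
  let dic : PySem.Dict String Int :=
    final_list.foldl (fun d item =>
      if d.contains item.2 then d.insert item.2 (d.getD item.2 0 + 1)
      else d.insert item.2 1) PySem.Dict.empty
  let st : Int × String :=
    dic.keys.foldl (fun s key =>
      if dic.getD key 0 > s.1 then (dic.getD key 0, key) else s) (0, " ")
  st.2

-- ===== PORT B =====
def find_votes_alt (final_list : List (String × String)) : String :=
  let dic : PySem.Dict String Int :=
    final_list.foldl (fun d item => d.insert item.2 (d.getD item.2 0 + 1)) PySem.Dict.empty
  if dic.items = [] then " "
  else PySem.List.pyGetD (PySem.List.sorted dic.keys (fun k => -(dic.getD k 0)) false) 0 " "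

-- ===== PRECONDITION & SPEC =====
def Spec_find_votes (final_list : List (String × String)) (out : String) : Prop := out = find_votes_alt final_list
instance (final_list : List (String × String)) (out : String) : Decidable (Spec_find_votes final_list out) := by unfold Spec_find_votes; infer_instance

-- ===== CLAIM (what is proved, stated in full; the proofs are below) =====
def Claim_equal_find_votes : Prop := ∀ (final_list : List (String × String)), Dom_find_votes final_list → Spec_find_votes final_list (find_votes final_list)

-- ===== LEMMAS AND PROOFS =====

-- A's if-contains counting step is exactly the Counter step d.modify k 0 (·+1).
theorem stepA_eq_modify (d : PySem.Dict String Int) (k : String) :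
    (if d.contains k then d.insert k (d.getD k 0 + 1) else d.insert k 1)
      = d.modify k 0 (· + 1) := by
  unfold PySem.Dict.modify
  by_cases h : d.contains k
  · simp [h]
  · have hf : d.items.find? (fun p => p.1 == k) = none := by
      rw [List.find?_eq_none]
      intro p hp hpk
      exact h (List.any_eq_true.mpr ⟨p, hp, hpk⟩)
    have h0 : d.getD k 0 = 0 := by
      simp [PySem.Dict.getD, PySem.Dict.get?, hf]
    simp [h, h0]

-- A's dict build is Counter of the vote labels.
theorem dicA_eq_counter (l : List (String × String)) :
    l.foldl (fun d item =>
      if d.contains item.2 then d.insert item.2 (d.getD item.2 0 + 1)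
      else d.insert item.2 1) PySem.Dict.empty
      = PySem.Dict.counter (l.map (fun p => p.2)) := by
  unfold PySem.Dict.counter
  rw [List.foldl_map]
  have : (fun (d : PySem.Dict String Int) (item : String × String) =>
      if d.contains item.2 then d.insert item.2 (d.getD item.2 0 + 1)
      else d.insert item.2 1)
      = fun d item => d.modify item.2 0 (· + 1) := by
    funext d item; exact stepA_eq_modify d item.2
  rw [this]

-- B's dic.get-based build is the same Counter (its step IS Dict.modify by definition).
theorem dicB_eq_counter (l : List (String × String)) :
    l.foldl (fun d item => d.insert item.2 (d.getD item.2 0 + 1)) PySem.Dict.empty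
      = PySem.Dict.counter (l.map (fun p => p.2)) := by
  unfold PySem.Dict.counter
  rw [List.foldl_map]
  rfl

-- Head of the insertion-sort fold from a nonempty accumulator is the first-minimum-key pick.
theorem foldl_insertBy_head (key : String → Int) :
    ∀ (t : List String) (x : String) (ys : List String),
      ∃ zs, t.foldl (fun acc y =>
          PySem.List.insertBy (fun a b => decide (key a < key b)) y acc) (x :: ys)
        = (t.foldl (fun m y => if key y < key m then y else m) x) :: zs := by
  intro t
  induction t with
  | nil => intro x ys; exact ⟨ys, rfl⟩
  | cons y t ih =>
    intro x ys
    simp only [List.foldl_cons, PySem.List.insertBy]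
    by_cases h : key y < key x
    · simp only [h, decide_true, if_true]
      exact ih y (x :: ys)
    · simp only [h, decide_false, if_false]
      exact ih x (PySem.List.insertBy (fun a b => decide (key a < key b)) y ys)

-- A's strict-greater scan, once a champion is installed, tracks the same pick fold.
theorem scan_eq_pick (c : String → Int) (t : List String) :
    ∀ m, t.foldl (fun (s : Int × String) key =>
          if c key > s.1 then (c key, key) else s) (c m, m)
      = (c (t.foldl (fun m y => if c m < c y then y else m) m),
         t.foldl (fun m y => if c m < c y then y else m) m) := by
  induction t with
  | nil => intro m; rfl
  | cons y t ih =>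
    intro m
    simp only [List.foldl_cons, gt_iff_lt]
    by_cases h : c m < c y
    · simp only [if_pos h]; exact ih y
    · simp only [if_neg h]; exact ih m

-- ===== VERDICT (by name: the statement is the Claim_ definition above) =====
theorem find_votes_spec : Claim_equal_find_votes := by
  unfold Claim_equal_find_votes
  intro l _
  unfold Spec_find_votes find_votes find_votes_alt
  simp only [dicA_eq_counter, dicB_eq_counter, PySem.Dict.keys_counter, PySem.Dict.getD_counter]
  cases hk : PySem.Set.ofList (l.map (fun p => p.2)) with
  | nil =>
    have hkeys : (PySem.Dict.counter (l.map (fun p => p.2))).keys = [] := by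
      rw [PySem.Dict.keys_counter, hk]
    have hitems : (PySem.Dict.counter (l.map (fun p => p.2))).items = [] := by
      rw [PySem.Dict.keys] at hkeys
      exact List.map_eq_nil_iff.mp hkeys
    simp [hitems]
  | cons x t =>
    have hitems : (PySem.Dict.counter (l.map (fun p => p.2))).items ≠ [] := by
      intro h
      have hkeys : (PySem.Dict.counter (l.map (fun p => p.2))).keys = x :: t := by
        rw [PySem.Dict.keys_counter, hk]
      rw [PySem.Dict.keys, h] at hkeys
      exact List.cons_ne_nil x t hkeys.symm
    rw [if_neg hitems]
    have hx : x ∈ l.map (fun p => p.2) := by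
      have : x ∈ PySem.Set.ofList (l.map (fun p => p.2)) := by
        rw [hk]; exact List.mem_cons_self
      exact (PySem.Set.mem_ofList _ _).mp this
    have hpos : (0 : Int) < (((l.map (fun p => p.2)).count x : Nat) : Int) := by
      exact_mod_cast List.count_pos_iff.mpr hx
    -- B side: sorted = pick :: zs
    rw [PySem.List.sorted_eq_foldl_insertBy]
    simp only [List.foldl_cons, PySem.List.insertBy]
    obtain ⟨zs, hz⟩ := foldl_insertBy_head
      (fun k => -(((l.map (fun p => p.2)).count k : Nat) : Int)) t x []
    rw [hz, PySem.List.pyGetD_zero_cons]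
    -- A side: install the champion, then track the pick fold
    simp only [gt_iff_lt, if_pos hpos,
      scan_eq_pick (fun k => (((l.map (fun p => p.2)).count k : Nat) : Int)) t x]
    simp only [neg_lt_neg_iff]
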